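-- pv_equiv track=rewrite | github.com/Xuan-0929/transform-skill | src/persona_distill/providers/heuristic.py | _parse_context
-- ===== SOURCE A (Python) =====
-- def _parse_context(
--     context: str
-- ) -> tuple[list[str], list[str], list[dict[str, str]], list[str], list[str], list[str]]:
--     claims: list[str] = []
--     styles: list[str] = []
--     dialogues: list[dict[str, str]] = []
--     lexicon: list[str] = []
--     model_cards: list[str] = []
--     decision_rules: list[str] = []
--     mode = ""
--     for raw_line in context.splitlines():
--         line = raw_line.strip()
--         if not line:
--             continue
--         if line == "[CLAIMS]":
--             mode = "claims"
--             continue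
--         if line == "[STYLE_MEMORY]":
--             mode = "style"
--             continue
--         if line == "[MODEL_CARDS]":
--             mode = "models"
--             continue
--         if line == "[DECISION_RULES]":
--             mode = "rules"
--             continue
--         if line == "[DIALOGUE_MEMORY]":
--             mode = "dialogue"
--             continue
--         if line == "[LEXICON]":
--             mode = "lexicon"
--             continue
--         if mode in {"claims", "style", "models", "rules"}:
--             line = line.lstrip("- ").strip()
--             if not line:
--                 continue
--             if mode == "claims":
--                 claims.append(line)
--             elif mode == "style":
--                 styles.append(line)
--             elif mode == "models":
--                 model_cards.append(line)
--             else: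
--                 decision_rules.append(line)
--         elif mode == "dialogue":
--             line = line.lstrip("- ").strip()
--             if "=> reply:" not in line:
--                 continue
--             left, right = line.split("=> reply:", 1)
--             left = left.replace("context:", "").strip()
--             right = right.strip()
--             if left and right:
--                 dialogues.append({"context": left, "reply": right})
--         elif mode == "lexicon":
--             lexicon = [tok.strip() for tok in line.split(",") if tok.strip()]
--     return claims, styles, dialogues, lexicon, model_cards, decision_rules
-- ===== SOURCE B (Python) =====
-- _HEADERS = {
--     "[CLAIMS]": "claims",
--     "[STYLE_MEMORY]": "style",
--     "[MODEL_CARDS]": "models",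
--     "[DECISION_RULES]": "rules",
--     "[DIALOGUE_MEMORY]": "dialogue",
--     "[LEXICON]": "lexicon",
-- }
--
--
-- def _group_sections(context: str) -> list[tuple[str, str]]:
--     """Pass 1: pair every stripped non-empty body line with its most recent section label."""
--     grouped: list[tuple[str, str]] = []
--     label = ""
--     for raw_line in context.splitlines():
--         line = raw_line.strip()
--         if not line:
--             continue
--         if line in _HEADERS:
--             label = _HEADERS[line]
--         elif label:
--             grouped.append((label, line))
--     return grouped
--
--
-- def _bullet_body(line: str) -> str:
--     return line.lstrip("- ").strip()
--
--
-- def _dialogue_entries(line: str) -> list[dict[str, str]]: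
--     body = _bullet_body(line)
--     if "=> reply:" not in body:
--         return []
--     left, right = body.split("=> reply:", 1)
--     left = left.replace("context:", "").strip()
--     right = right.strip()
--     if left and right:
--         return [{"context": left, "reply": right}]
--     return []
--
--
-- def _lexicon_tokens(line: str) -> list[str]:
--     return [tok.strip() for tok in line.split(",") if tok.strip()]
--
--
-- def _parse_context(
--     context: str
-- ) -> tuple[list[str], list[str], list[dict[str, str]], list[str], list[str], list[str]]:
--     claims: list[str] = []
--     styles: list[str] = []
--     dialogues: list[dict[str, str]] = []
--     lexicon: list[str] = []
--     model_cards: list[str] = []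
--     decision_rules: list[str] = []
--     # Pass 2: dispatch each grouped (label, line) pair to its handler.
--     for label, line in _group_sections(context):
--         if label == "dialogue":
--             dialogues.extend(_dialogue_entries(line))
--         elif label == "lexicon":
--             lexicon = _lexicon_tokens(line)
--         else:
--             body = _bullet_body(line)
--             if not body:
--                 continue
--             if label == "claims":
--                 claims.append(body)
--             elif label == "style":
--                 styles.append(body)
--             elif label == "models":
--                 model_cards.append(body)
--             elif label == "rules":
--                 decision_rules.append(body)
--     return claims, styles, dialogues, lexicon, model_cards, decision_rules
-- ===== Notes on version B (the rewrite author's own statement) =====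
-- stated objective: alternative
-- what changed: Replaced A's single state-machine loop (mode variable + inline per-mode branches) with a two-pass decomposition: pass 1 groups each stripped body line with its most recent section label via a header dict; pass 2 dispatches each (label, line) pair to small handler functions (shared bullet handler, dialogue-entry handler, lexicon handler with last-line-wins).
import Mathlib
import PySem

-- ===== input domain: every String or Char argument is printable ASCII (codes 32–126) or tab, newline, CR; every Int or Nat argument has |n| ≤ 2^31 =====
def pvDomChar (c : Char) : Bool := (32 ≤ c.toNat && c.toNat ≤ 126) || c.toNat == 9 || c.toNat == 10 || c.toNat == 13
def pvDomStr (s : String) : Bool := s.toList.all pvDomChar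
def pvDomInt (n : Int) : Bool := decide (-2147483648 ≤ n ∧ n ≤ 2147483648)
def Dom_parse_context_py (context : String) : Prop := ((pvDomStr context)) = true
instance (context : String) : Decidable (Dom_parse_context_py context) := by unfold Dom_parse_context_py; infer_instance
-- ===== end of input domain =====

-- B re-implements A's single state-machine loop as two passes (group body lines under their
-- section label, then dispatch each group entry to a handler); same return value, alternative decomposition.

-- hand port of Python's s.lstrip("- "): drop leading '-' and ' ' characters (exact: lstrip with a char set)
def pyLstripDashSpace (s : String) : String :=
  String.ofList (s.toList.dropWhile (fun c => c == '-' || c == ' '))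

structure PCSt where
  claims : List String
  styles : List String
  dialogues : List (List (String × String))
  lexicon : List String
  models : List String
  rules : List String
deriving Repr, DecidableEq

-- ===== PORT A =====
def stepA (st : PCSt × String) (raw_line : String) : PCSt × String :=
  let line := PySem.Str.strip raw_line
  if line = "" then st
  else if line = "[CLAIMS]" then (st.1, "claims")
  else if line = "[STYLE_MEMORY]" then (st.1, "style")
  else if line = "[MODEL_CARDS]" then (st.1, "models")
  else if line = "[DECISION_RULES]" then (st.1, "rules")
  else if line = "[DIALOGUE_MEMORY]" then (st.1, "dialogue")
  else if line = "[LEXICON]" then (st.1, "lexicon")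
  else
    let s := st.1
    let mode := st.2
    if mode ∈ (["claims", "style", "models", "rules"] : List String) then
      let line := PySem.Str.strip (pyLstripDashSpace line)
      if line = "" then st
      else if mode = "claims" then ({ s with claims := s.claims ++ [line] }, mode)
      else if mode = "style" then ({ s with styles := s.styles ++ [line] }, mode)
      else if mode = "models" then ({ s with models := s.models ++ [line] }, mode)
      else ({ s with rules := s.rules ++ [line] }, mode)
    else if mode = "dialogue" then
      let line := PySem.Str.strip (pyLstripDashSpace line)
      if PySem.Str.isIn "=> reply:" line = true then
        let parts := (PySem.Str.splitMax? line "=> reply:" 1).getD []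
        let left := PySem.Str.strip (PySem.Str.replace (parts.getD 0 "") "context:" "")
        let right := PySem.Str.strip (parts.getD 1 "")
        if left ≠ "" ∧ right ≠ "" then
          ({ s with dialogues := s.dialogues ++ [[("context", left), ("reply", right)]] }, mode)
        else st
      else st
    else if mode = "lexicon" then
      ({ s with lexicon := ((PySem.Str.split? line ",").getD []).filterMap (fun tok =>
          let t := PySem.Str.strip tok
          if t = "" then none else some t) }, mode)
    else st

def parse_context_py (context : String) :
    List String × List String × (List (List (String × String))) × List String × List String × List String :=
  let fin := (PySem.Str.splitlines context).foldl stepA (⟨[], [], [], [], [], []⟩, "")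
  (fin.1.claims, fin.1.styles, fin.1.dialogues, fin.1.lexicon, fin.1.models, fin.1.rules)

-- ===== PORT B =====
def headersDict : PySem.Dict String String :=
  PySem.Dict.ofList [("[CLAIMS]", "claims"), ("[STYLE_MEMORY]", "style"), ("[MODEL_CARDS]", "models"),
    ("[DECISION_RULES]", "rules"), ("[DIALOGUE_MEMORY]", "dialogue"), ("[LEXICON]", "lexicon")]

def pass1Step (st : String × List (String × String)) (raw_line : String) : String × List (String × String) :=
  let line := PySem.Str.strip raw_line
  if line = "" then st
  else if headersDict.contains line then (headersDict.getD line "", st.2)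
  else if st.1 = "" then st
  else (st.1, st.2 ++ [(st.1, line)])

def group_sections (context : String) : List (String × String) :=
  ((PySem.Str.splitlines context).foldl pass1Step ("", [])).2

def bullet_body (line : String) : String := PySem.Str.strip (pyLstripDashSpace line)

def dialogue_entries (line : String) : List (List (String × String)) :=
  let body := bullet_body line
  if PySem.Str.isIn "=> reply:" body = true then
    let parts := (PySem.Str.splitMax? body "=> reply:" 1).getD []
    let left := PySem.Str.strip (PySem.Str.replace (parts.getD 0 "") "context:" "")
    let right := PySem.Str.strip (parts.getD 1 "")
    if left ≠ "" ∧ right ≠ "" then [[("context", left), ("reply", right)]] else []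
  else []

def lexicon_tokens (line : String) : List String :=
  ((PySem.Str.split? line ",").getD []).filterMap (fun tok =>
    let t := PySem.Str.strip tok
    if t = "" then none else some t)

def stepB (s : PCSt) (p : String × String) : PCSt :=
  if p.1 = "dialogue" then
    { s with dialogues := s.dialogues ++ dialogue_entries p.2 }
  else if p.1 = "lexicon" then { s with lexicon := lexicon_tokens p.2 }
  else
    let body := bullet_body p.2
    if body = "" then s
    else if p.1 = "claims" then { s with claims := s.claims ++ [body] }
    else if p.1 = "style" then { s with styles := s.styles ++ [body] }
    else if p.1 = "models" then { s with models := s.models ++ [body] }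
    else if p.1 = "rules" then { s with rules := s.rules ++ [body] }
    else s

def parse_context_py_alt (context : String) :
    List String × List String × (List (List (String × String))) × List String × List String × List String :=
  let fin := (group_sections context).foldl stepB ⟨[], [], [], [], [], []⟩
  (fin.claims, fin.styles, fin.dialogues, fin.lexicon, fin.models, fin.rules)

-- ===== PRECONDITION & SPEC =====
def Spec_parse_context_py (context : String) (out : List String × List String × (List (List (String × String))) × List String × List String × List String) : Prop := out = parse_context_py_alt context
instance (context : String) (out : List String × List String × (List (List (String × String))) × List String × List String × List String) : Decidable (Spec_parse_context_py context out) := by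
  unfold Spec_parse_context_py
  exact @instDecidableEqProd _ _ (fun a b => inferInstance) (fun a b => inferInstance) out
    (parse_context_py_alt context)

-- ===== CLAIM (what is proved, stated in full; the proofs are below) =====
def Claim_equal_parse_context_py : Prop := ∀ (context : String), Dom_parse_context_py context → Spec_parse_context_py context (parse_context_py context)

-- ===== LEMMAS AND PROOFS =====

lemma headersDict_not_contains (line : String) (h1 : line ≠ "[CLAIMS]") (h2 : line ≠ "[STYLE_MEMORY]")
    (h3 : line ≠ "[MODEL_CARDS]") (h4 : line ≠ "[DECISION_RULES]") (h5 : line ≠ "[DIALOGUE_MEMORY]")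
    (h6 : line ≠ "[LEXICON]") : headersDict.contains line = false := by
  rw [show headersDict = PySem.Dict.mk [("[CLAIMS]", "claims"), ("[STYLE_MEMORY]", "style"),
      ("[MODEL_CARDS]", "models"), ("[DECISION_RULES]", "rules"), ("[DIALOGUE_MEMORY]", "dialogue"),
      ("[LEXICON]", "lexicon")] from by decide]
  simp [PySem.Dict.contains_mk]
  exact ⟨Ne.symm h1, Ne.symm h2, Ne.symm h3, Ne.symm h4, Ne.symm h5, Ne.symm h6⟩

lemma pass1_acc (lines : List String) (m : String) (acc : List (String × String)) :
    (lines.foldl pass1Step (m, acc)).2 = acc ++ (lines.foldl pass1Step (m, [])).2 := by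
  induction lines generalizing m acc with
  | nil => simp
  | cons raw rest ih =>
    simp only [List.foldl_cons]
    by_cases h0 : PySem.Str.strip raw = ""
    · rw [show pass1Step (m, acc) raw = (m, acc) from by simp [pass1Step, h0],
        show pass1Step (m, ([] : List (String × String))) raw = (m, []) from by
          simp [pass1Step, h0]]
      exact ih m acc
    · by_cases hh : headersDict.contains (PySem.Str.strip raw)
      · rw [show pass1Step (m, acc) raw = (headersDict.getD (PySem.Str.strip raw) "", acc) from by
            simp [pass1Step, h0, hh],
          show pass1Step (m, ([] : List (String × String))) raw
              = (headersDict.getD (PySem.Str.strip raw) "", []) from by simp [pass1Step, h0, hh]]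
        exact ih _ acc
      · by_cases hm : m = ""
        · rw [show pass1Step (m, acc) raw = (m, acc) from by simp [pass1Step, h0, hh, hm],
            show pass1Step (m, ([] : List (String × String))) raw = (m, []) from by
              simp [pass1Step, h0, hh, hm]]
          exact ih m acc
        · rw [show pass1Step (m, acc) raw = (m, acc ++ [(m, PySem.Str.strip raw)]) from by
              simp [pass1Step, h0, hh, hm],
            show pass1Step (m, ([] : List (String × String))) raw
                = (m, [(m, PySem.Str.strip raw)]) from by simp [pass1Step, h0, hh, hm]]
          rw [ih m (acc ++ [(m, PySem.Str.strip raw)]), ih m [(m, PySem.Str.strip raw)]]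
          simp

lemma step_body (s : PCSt) (m raw : String)
    (h0 : PySem.Str.strip raw ≠ "")
    (hh : headersDict.contains (PySem.Str.strip raw) = false)
    (hm : m ≠ "") :
    stepA (s, m) raw = (stepB s (m, PySem.Str.strip raw), m) := by
  have h1 : PySem.Str.strip raw ≠ "[CLAIMS]" := by
    intro h; rw [h] at hh
    exact Bool.noConfusion ((by decide : headersDict.contains "[CLAIMS]" = true).symm.trans hh)
  have h2 : PySem.Str.strip raw ≠ "[STYLE_MEMORY]" := by
    intro h; rw [h] at hh
    exact Bool.noConfusion ((by decide : headersDict.contains "[STYLE_MEMORY]" = true).symm.trans hh)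
  have h3 : PySem.Str.strip raw ≠ "[MODEL_CARDS]" := by
    intro h; rw [h] at hh
    exact Bool.noConfusion ((by decide : headersDict.contains "[MODEL_CARDS]" = true).symm.trans hh)
  have h4 : PySem.Str.strip raw ≠ "[DECISION_RULES]" := by
    intro h; rw [h] at hh
    exact Bool.noConfusion ((by decide : headersDict.contains "[DECISION_RULES]" = true).symm.trans hh)
  have h5 : PySem.Str.strip raw ≠ "[DIALOGUE_MEMORY]" := by
    intro h; rw [h] at hh
    exact Bool.noConfusion ((by decide : headersDict.contains "[DIALOGUE_MEMORY]" = true).symm.trans hh)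
  have h6 : PySem.Str.strip raw ≠ "[LEXICON]" := by
    intro h; rw [h] at hh
    exact Bool.noConfusion ((by decide : headersDict.contains "[LEXICON]" = true).symm.trans hh)
  by_cases hc : m = "claims"
  · simp [stepA, stepB, bullet_body, h0, h1, h2, h3, h4, h5, h6, hc]
    split_ifs <;> rfl
  by_cases hs : m = "style"
  · simp [stepA, stepB, bullet_body, h0, h1, h2, h3, h4, h5, h6, hs]
    split_ifs <;> rfl
  by_cases hmo : m = "models"
  · simp [stepA, stepB, bullet_body, h0, h1, h2, h3, h4, h5, h6, hmo]
    split_ifs <;> rfl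
  by_cases hr : m = "rules"
  · simp [stepA, stepB, bullet_body, h0, h1, h2, h3, h4, h5, h6, hr]
    split_ifs <;> rfl
  by_cases hd : m = "dialogue"
  · subst hd
    simp only [stepA, stepB, dialogue_entries, bullet_body]
    split_ifs <;> simp_all
  by_cases hl : m = "lexicon"
  · simp [stepA, stepB, lexicon_tokens, h0, h1, h2, h3, h4, h5, h6, hl]
  · simp [stepA, stepB, bullet_body, h0, h1, h2, h3, h4, h5, h6, hc, hs, hmo, hr, hd, hl]

lemma header_lookup (line m2 : String)
    (h : line = "[CLAIMS]" ∧ m2 = "claims" ∨ line = "[STYLE_MEMORY]" ∧ m2 = "style" ∨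
         line = "[MODEL_CARDS]" ∧ m2 = "models" ∨ line = "[DECISION_RULES]" ∧ m2 = "rules" ∨
         line = "[DIALOGUE_MEMORY]" ∧ m2 = "dialogue" ∨ line = "[LEXICON]" ∧ m2 = "lexicon") :
    headersDict.contains line = true ∧ headersDict.getD line "" = m2 := by
  rcases h with ⟨h, h'⟩ | ⟨h, h'⟩ | ⟨h, h'⟩ | ⟨h, h'⟩ | ⟨h, h'⟩ | ⟨h, h'⟩ <;>
    subst h <;> subst h' <;> constructor <;> rfl

lemma main_fold (lines : List String) (s : PCSt) (m : String) :
    (lines.foldl stepA (s, m)).1 = ((lines.foldl pass1Step (m, [])).2).foldl stepB s := by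
  induction lines generalizing s m with
  | nil => simp
  | cons raw rest ih =>
    simp only [List.foldl_cons]
    by_cases h0 : PySem.Str.strip raw = ""
    · rw [show stepA (s, m) raw = (s, m) from by simp [stepA, h0],
        show pass1Step (m, []) raw = (m, []) from by simp [pass1Step, h0]]
      exact ih s m
    · by_cases h1 : PySem.Str.strip raw = "[CLAIMS]"
      · obtain ⟨hc, hg⟩ := header_lookup _ _ (Or.inl ⟨h1, rfl⟩)
        rw [show stepA (s, m) raw = (s, "claims") from by simp [stepA, h1],
          show pass1Step (m, []) raw = ("claims", []) from by simp [pass1Step, h0, hc, hg]]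
        exact ih s _
      by_cases h2 : PySem.Str.strip raw = "[STYLE_MEMORY]"
      · obtain ⟨hc, hg⟩ := header_lookup _ _ (Or.inr (Or.inl ⟨h2, rfl⟩))
        rw [show stepA (s, m) raw = (s, "style") from by simp [stepA, h2],
          show pass1Step (m, []) raw = ("style", []) from by simp [pass1Step, h0, hc, hg]]
        exact ih s _
      by_cases h3 : PySem.Str.strip raw = "[MODEL_CARDS]"
      · obtain ⟨hc, hg⟩ := header_lookup _ _ (Or.inr (Or.inr (Or.inl ⟨h3, rfl⟩)))
        rw [show stepA (s, m) raw = (s, "models") from by simp [stepA, h3],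
          show pass1Step (m, []) raw = ("models", []) from by simp [pass1Step, h0, hc, hg]]
        exact ih s _
      by_cases h4 : PySem.Str.strip raw = "[DECISION_RULES]"
      · obtain ⟨hc, hg⟩ := header_lookup _ _ (Or.inr (Or.inr (Or.inr (Or.inl ⟨h4, rfl⟩))))
        rw [show stepA (s, m) raw = (s, "rules") from by simp [stepA, h4],
          show pass1Step (m, []) raw = ("rules", []) from by simp [pass1Step, h0, hc, hg]]
        exact ih s _
      by_cases h5 : PySem.Str.strip raw = "[DIALOGUE_MEMORY]"
      · obtain ⟨hc, hg⟩ := header_lookup _ _ (Or.inr (Or.inr (Or.inr (Or.inr (Or.inl ⟨h5, rfl⟩)))))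
        rw [show stepA (s, m) raw = (s, "dialogue") from by simp [stepA, h5],
          show pass1Step (m, []) raw = ("dialogue", []) from by simp [pass1Step, h0, hc, hg]]
        exact ih s _
      by_cases h6 : PySem.Str.strip raw = "[LEXICON]"
      · obtain ⟨hc, hg⟩ := header_lookup _ _ (Or.inr (Or.inr (Or.inr (Or.inr (Or.inr ⟨h6, rfl⟩)))))
        rw [show stepA (s, m) raw = (s, "lexicon") from by simp [stepA, h6],
          show pass1Step (m, []) raw = ("lexicon", []) from by simp [pass1Step, h0, hc, hg]]
        exact ih s _
      · -- not a header line
        have hh : headersDict.contains (PySem.Str.strip raw) = false :=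
          headersDict_not_contains _ h1 h2 h3 h4 h5 h6
        by_cases hm : m = ""
        · rw [show stepA (s, m) raw = (s, m) from by
              simp [stepA, h0, h1, h2, h3, h4, h5, h6, hm],
            show pass1Step (m, []) raw = (m, []) from by simp [pass1Step, h0, hh, hm]]
          exact ih s m
        · rw [step_body s m raw h0 hh hm,
            show pass1Step (m, []) raw = (m, [(m, PySem.Str.strip raw)]) from by
              simp [pass1Step, h0, hh, hm]]
          rw [pass1_acc rest m [(m, PySem.Str.strip raw)]]
          simp only [List.singleton_append, List.foldl_cons]
          exact ih _ m

-- ===== VERDICT (by name: the statement is the Claim_ definition above) =====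
theorem parse_context_py_spec : Claim_equal_parse_context_py := by
  intro context _
  simp only [Spec_parse_context_py, parse_context_py, parse_context_py_alt, group_sections]
  rw [main_fold]
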